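-- pv_equiv track=rewrite | github.com/ZhuYacheng/python.keyword_find | function.py | if_else_elif_num
-- ===== SOURCE A (Python) =====
-- def if_else_elif_num(all_words):
--     """统计if-else和if-else if语句个数"""
--     if_num = 0
--     new_list = []
--     if_elif_num = 0
--     for word in all_words:
--         count = 0  # 标志位，1  则为if-else-if 语句 ，0 为if-else语句
--
--         if word == 'if':
--             if_num += 1
--
--         if word == 'if' or word == 'elif':
--             new_list.append(word)
--         elif word == 'else':
--             while True:
--                 temp = new_list.pop()
--                 if temp == 'elif':
--                     count = 1
--                 elif temp == 'if':
--                     break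
--         if count == 1:
--             if_elif_num += 1
--     for word in new_list:  # 删除出现if-elseif-elseif的情况
--         if word == 'if':
--             if_num -= 1
--
--     return if_num, if_elif_num
-- ===== SOURCE B (Python) =====
-- def if_else_elif_num(all_words):
--     """统计if-else和if-else if语句个数"""
--     if_num = 0
--     if_elif_num = 0
--     stack = []  # one bool per open 'if': has this if-construct seen an elif?
--     for word in all_words:
--         if word == 'if':
--             stack.append(False)
--         elif word == 'elif':
--             if stack:
--                 stack[-1] = True
--         elif word == 'else':
--             has_elif = stack.pop()
--             if_num += 1
--             if has_elif:
--                 if_elif_num += 1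
--     return if_num, if_elif_num
-- ===== Notes on version B (the rewrite author's own statement) =====
-- stated objective: simpler
-- what changed: Replaces A's string stack with inner while-pop loop plus a final cleanup pass by a single pass over the words maintaining a stack of booleans (one per open 'if', flag = 'saw an elif'); 'else' just pops one flag, so both the inner loop and the second pass disappear.
import Mathlib
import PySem

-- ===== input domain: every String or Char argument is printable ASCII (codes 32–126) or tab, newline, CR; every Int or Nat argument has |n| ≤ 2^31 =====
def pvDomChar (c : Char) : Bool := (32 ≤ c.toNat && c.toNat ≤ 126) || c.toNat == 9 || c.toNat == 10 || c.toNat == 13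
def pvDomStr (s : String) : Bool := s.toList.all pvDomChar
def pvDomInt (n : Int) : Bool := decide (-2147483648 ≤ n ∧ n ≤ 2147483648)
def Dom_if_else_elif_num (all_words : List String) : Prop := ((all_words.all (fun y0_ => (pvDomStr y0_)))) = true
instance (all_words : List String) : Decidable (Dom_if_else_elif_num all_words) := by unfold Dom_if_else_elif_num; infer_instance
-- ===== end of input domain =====

-- B replaces A's string stack + inner while-pop loop + final cleanup pass by one pass over a
-- stack of booleans ('this open if has seen an elif'); objective: simpler.

-- ===== PORT A =====
-- inner `while True: temp = new_list.pop(); …` loop; `none` models the IndexError of pop() on []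
def pvPopLoopA (l : List String) (count : Int) : Option (List String × Int) :=
  match h : PySem.List.pop? l (-1) with
  | none => none
  | some (temp, l') =>
    if temp = "elif" then pvPopLoopA l' 1
    else if temp = "if" then some (l', count)
    else pvPopLoopA l' count
termination_by l.length
decreasing_by
  all_goals (have h2 := PySem.List.length_of_pop?_eq_some l h; simp at h2; omega)

-- one iteration of A's for loop; state = some (if_num, new_list, if_elif_num), none = raised
def pvStepA (st : Option (Int × List String × Int)) (word : String) :
    Option (Int × List String × Int) :=
  match st with
  | none => none
  | some (if_num, new_list, if_elif_num) =>
    let if_num := if word = "if" then if_num + 1 else if_num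
    if word = "if" ∨ word = "elif" then
      some (if_num, new_list ++ [word], if_elif_num)
    else if word = "else" then
      match pvPopLoopA new_list 0 with
      | none => none
      | some (new_list, count) =>
        some (if_num, new_list, if count = 1 then if_elif_num + 1 else if_elif_num)
    else
      some (if_num, new_list, if_elif_num)

def if_else_elif_num (all_words : List String) : Int × Int :=
  match all_words.foldl pvStepA (some (0, [], 0)) with
  | none => (0, 0)   -- Python raises IndexError here (outside Pre_)
  | some (if_num, new_list, if_elif_num) =>
    -- second for loop: for word in new_list: if word == 'if': if_num -= 1
    (new_list.foldl (fun n w => if w = "if" then n - 1 else n) if_num, if_elif_num)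

-- ===== PORT B =====
-- one iteration of B's loop; state = some (if_num, stack, if_elif_num), none = raised
def pvStepB (st : Option (Int × List Bool × Int)) (word : String) :
    Option (Int × List Bool × Int) :=
  match st with
  | none => none
  | some (if_num, stack, if_elif_num) =>
    if word = "if" then some (if_num, stack ++ [false], if_elif_num)
    else if word = "elif" then
      some (if_num, if stack = [] then stack else stack.dropLast ++ [true], if_elif_num)
    else if word = "else" then
      match PySem.List.pop? stack (-1) with
      | none => none   -- Python raises IndexError here (outside Pre_)
      | some (has_elif, stack) =>
        some (if_num + 1, stack, if has_elif then if_elif_num + 1 else if_elif_num)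
    else st

def if_else_elif_num_alt (all_words : List String) : Int × Int :=
  match all_words.foldl pvStepB (some (0, [], 0)) with
  | none => (0, 0)
  | some (if_num, _, if_elif_num) => (if_num, if_elif_num)

-- ===== PRECONDITION & SPEC =====
-- Pre_ excludes exactly the inputs where Python A raises IndexError: some 'else' token is not
-- preceded by strictly more 'if' tokens than 'else' tokens.
def Pre_if_else_elif_num (all_words : List String) : Prop :=
  ∀ i, i < all_words.length → all_words.getD i "" = "else" →
    (all_words.take i).count "else" < (all_words.take i).count "if"
instance (all_words : List String) : Decidable (Pre_if_else_elif_num all_words) := by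
  unfold Pre_if_else_elif_num; infer_instance
def pvWitness_if_else_elif_num : List String := ["if", "elif", "else", "if", "else"]
def Spec_if_else_elif_num (all_words : List String) (out : Int × Int) : Prop := out = if_else_elif_num_alt all_words
instance (all_words : List String) (out : Int × Int) : Decidable (Spec_if_else_elif_num all_words out) := by unfold Spec_if_else_elif_num; infer_instance

-- ===== CLAIM (what is proved, stated in full; the proofs are below) =====
def Claim_equal_if_else_elif_num : Prop := ∀ (all_words : List String), Dom_if_else_elif_num all_words → Pre_if_else_elif_num all_words → Spec_if_else_elif_num all_words (if_else_elif_num all_words)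

-- ===== LEMMAS AND PROOFS =====

-- canonical shape of A's stack: k stray leading "elif"s, then per open if an "if" followed by
-- its ns[i] "elif"s
def pvCanon (k : Nat) (ns : List Nat) : List String :=
  List.replicate k "elif" ++ ns.flatMap (fun n => "if" :: List.replicate n "elif")

def pvFlags (ns : List Nat) : List Bool := ns.map (fun n => decide (0 < n))

lemma pvCanon_append_if (k : Nat) (ns : List Nat) :
    pvCanon k (ns ++ [0]) = pvCanon k ns ++ ["if"] := by
  simp [pvCanon]

lemma pvCanon_append_elif (k : Nat) (ns : List Nat) (n : Nat) :
    pvCanon k (ns ++ [n + 1]) = pvCanon k (ns ++ [n]) ++ ["elif"] := by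
  simp [pvCanon, List.replicate_succ' (n := n)]

lemma pvPopLoopA_replicate (m : Nat) (c : Int) :
    pvPopLoopA (List.replicate m "elif") c = none := by
  induction m generalizing c with
  | zero =>
      rw [pvPopLoopA]
      split
      · rfl
      · next temp l' heq => simp [PySem.List.pop?, PySem.List.pyIdx?] at heq
  | succ m ih =>
      rw [List.replicate_succ', pvPopLoopA]
      split
      · rfl
      · next temp l' heq =>
          rw [PySem.List.pop?_last] at heq
          injection heq with h
          injection h with h1 h2
          subst h1; subst h2
          simp [ih]

lemma pvPopLoopA_seg (l : List String) (n : Nat) (c : Int) :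
    pvPopLoopA (l ++ "if" :: List.replicate n "elif") c
      = some (l, if 0 < n then 1 else c) := by
  induction n generalizing c with
  | zero =>
      rw [List.replicate_zero, pvPopLoopA]
      split
      · next heq => rw [PySem.List.pop?_last] at heq; cases heq
      · next temp l' heq =>
          rw [PySem.List.pop?_last] at heq
          injection heq with h
          injection h with h1 h2
          subst h1; subst h2
          simp
  | succ n ih =>
      have hsh : l ++ "if" :: List.replicate (n + 1) "elif"
          = (l ++ "if" :: List.replicate n "elif") ++ ["elif"] := by
        simp [List.replicate_succ' (n := n)]
      rw [hsh, pvPopLoopA]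
      split
      · next heq => rw [PySem.List.pop?_last] at heq; cases heq
      · next temp l' heq =>
          rw [PySem.List.pop?_last] at heq
          injection heq with h
          injection h with h1 h2
          subst h1; subst h2
          rw [if_pos rfl, ih 1]
          by_cases hn : 0 < n <;> simp [hn]

lemma pvCanon_count_if (k : Nat) (ns : List Nat) :
    (pvCanon k ns).count "if" = ns.length := by
  induction ns generalizing k with
  | nil => simp [pvCanon, List.count_replicate]
  | cons n ns ih =>
      have h : pvCanon k (n :: ns) = (List.replicate k "elif" ++ "if" :: List.replicate n "elif") ++ ns.flatMap (fun m => "if" :: List.replicate m "elif") := by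
        simp [pvCanon]
      have h2 : pvCanon 0 ns = ns.flatMap (fun m => "if" :: List.replicate m "elif") := by
        simp [pvCanon]
      rw [h, List.count_append, ← h2, ih 0]
      simp [List.count_replicate]
      omega

lemma pvCleanup (l : List String) (a : Int) :
    l.foldl (fun n w => if w = "if" then n - 1 else n) a = a - l.count "if" := by
  induction l generalizing a with
  | nil => simp
  | cons w l ih =>
      by_cases h : w = "if" <;> simp [h, ih] <;> push_cast <;> ring

lemma pvFoldA_none (ws : List String) : ws.foldl pvStepA none = none := by
  induction ws with
  | nil => rfl
  | cons w ws ih => simpa [pvStepA] using ih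

lemma pvFoldB_none (ws : List String) : ws.foldl pvStepB none = none := by
  induction ws with
  | nil => rfl
  | cons w ws ih => simpa [pvStepB] using ih

-- the simulation: from related states, the two programs compute equal results
lemma pvSim (ws : List String) (k : Nat) (ns : List Nat) (a c : Int) :
    (match ws.foldl pvStepA (some (a + ns.length, pvCanon k ns, c)) with
      | none => ((0 : Int), (0 : Int))
      | some (i, l, e) => (l.foldl (fun n w => if w = "if" then n - 1 else n) i, e))
    = (match ws.foldl pvStepB (some (a, pvFlags ns, c)) with
      | none => ((0 : Int), (0 : Int))
      | some (i, _, e) => (i, e)) := by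
  induction ws generalizing k ns a c with
  | nil =>
      simp only [List.foldl_nil]
      rw [pvCleanup]
      have := pvCanon_count_if k ns
      simp [this]
  | cons w ws ih =>
      simp only [List.foldl_cons]
      by_cases hif : w = "if"
      · subst hif
        have hA : pvStepA (some (a + ns.length, pvCanon k ns, c)) "if"
            = some (a + (ns ++ [0]).length, pvCanon k (ns ++ [0]), c) := by
          simp [pvStepA, pvCanon_append_if]; push_cast; ring
        have hB : pvStepB (some (a, pvFlags ns, c)) "if"
            = some (a, pvFlags (ns ++ [0]), c) := by
          simp [pvStepB, pvFlags]
        rw [hA, hB]; exact ih k (ns ++ [0]) a c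
      · by_cases helif : w = "elif"
        · subst helif
          rcases List.eq_nil_or_concat ns with rfl | ⟨ns, n, rfl⟩
          · have hA : pvStepA (some (a + ([] : List Nat).length, pvCanon k [], c)) "elif"
                = some (a + ([] : List Nat).length, pvCanon (k + 1) [], c) := by
              simp [pvStepA, pvCanon, List.replicate_succ' (n := k)]
            have hB : pvStepB (some (a, pvFlags [], c)) "elif"
                = some (a, pvFlags [], c) := by
              simp [pvStepB, pvFlags]
            rw [hA, hB]; exact ih (k + 1) [] a c
          · simp only [List.concat_eq_append]
            have hA : pvStepA (some (a + (ns ++ [n]).length, pvCanon k (ns ++ [n]), c)) "elif"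
                = some (a + (ns ++ [n + 1]).length, pvCanon k (ns ++ [n + 1]), c) := by
              simp [pvStepA, pvCanon_append_elif]
            have hB : pvStepB (some (a, pvFlags (ns ++ [n]), c)) "elif"
                = some (a, pvFlags (ns ++ [n + 1]), c) := by
              simp [pvStepB, pvFlags]
            rw [hA, hB]; exact ih k (ns ++ [n + 1]) a c
        · by_cases helse : w = "else"
          · subst helse
            rcases List.eq_nil_or_concat ns with rfl | ⟨ns, n, rfl⟩
            · have hA : pvStepA (some (a + ([] : List Nat).length, pvCanon k [], c)) "else"
                  = none := by
                simp [pvStepA, pvCanon, pvPopLoopA_replicate]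
              have hB : pvStepB (some (a, pvFlags [], c)) "else" = none := by
                simp [pvStepB, pvFlags, PySem.List.pop?]
              rw [hA, hB, pvFoldA_none, pvFoldB_none]
            · simp only [List.concat_eq_append]
              have hseg : pvCanon k (ns ++ [n]) = pvCanon k ns ++ "if" :: List.replicate n "elif" := by
                simp [pvCanon]
              have hA : pvStepA (some (a + (ns ++ [n]).length, pvCanon k (ns ++ [n]), c)) "else"
                  = some ((a + 1) + ns.length, pvCanon k ns,
                      if 0 < n then c + 1 else c) := by
                rw [show pvStepA (some (a + ((ns ++ [n]).length : Int), pvCanon k (ns ++ [n]), c)) "else"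
                    = (match pvPopLoopA (pvCanon k (ns ++ [n])) 0 with
                      | none => none
                      | some (l, count) => some (a + ((ns ++ [n]).length : Int), l, if count = 1 then c + 1 else c)) from by
                  simp [pvStepA]]
                rw [hseg, pvPopLoopA_seg]
                by_cases hn : 0 < n <;> simp [hn, Prod.ext_iff] <;> omega
              have hB : pvStepB (some (a, pvFlags (ns ++ [n]), c)) "else"
                  = some (a + 1, pvFlags ns, if 0 < n then c + 1 else c) := by
                have hfl : pvFlags (ns ++ [n]) = pvFlags ns ++ [decide (0 < n)] := by
                  simp [pvFlags]
                simp only [hfl]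
                by_cases hn : 0 < n <;>
                  simp [pvStepB, PySem.List.pop?_last, hn]
              rw [hA, hB]; exact ih k ns (a + 1) (if 0 < n then c + 1 else c)
          · have hA : pvStepA (some (a + ns.length, pvCanon k ns, c)) w
                = some (a + ns.length, pvCanon k ns, c) := by
              simp [pvStepA, hif, helif, helse]
            have hB : pvStepB (some (a, pvFlags ns, c)) w
                = some (a, pvFlags ns, c) := by
              simp [pvStepB, hif, helif, helse]
            rw [hA, hB]; exact ih k ns a c

-- ===== VERDICT (by name: the statement is the Claim_ definition above) =====
theorem if_else_elif_num_spec : Claim_equal_if_else_elif_num := by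
  intro all_words _ _
  unfold Spec_if_else_elif_num if_else_elif_num if_else_elif_num_alt
  have h := pvSim all_words 0 [] 0 0
  simpa [pvCanon, pvFlags] using h
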